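-- pv_equiv track=rewrite | github.com/Harshit242005/Internship | DSA/stack/remove same work from stack.py | remove_same_word
-- ===== SOURCE A (Python) =====
-- def remove_same_word(word):
--     stack = []
--     for i in range(len(word)):
--         if len(stack) == 0:
--             stack.append(word[i])
--         else:
--             Str = stack[-1]
--             if Str == word[i]:
--                 stack.pop()
--
--
--             else:
--                 stack.append(word[i])
--
--     return len(stack)
-- ===== SOURCE B (Python) =====
-- def remove_same_word(word):
--     seq = list(word)
--     changed = True
--     while changed:
--         changed = False
--         for i in range(len(seq) - 1):
--             if seq[i] == seq[i + 1]:
--                 del seq[i:i + 2]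
--                 changed = True
--                 break
--     return len(seq)
-- ===== Notes on version B (the rewrite author's own statement) =====
-- stated objective: alternative
-- what changed: Replaced the single-pass stack simulation by a fixpoint rewriting: repeatedly find the first adjacent equal pair, delete both characters, and restart until no adjacent pair remains; the length of the stabilized sequence is returned.
import Mathlib
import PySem

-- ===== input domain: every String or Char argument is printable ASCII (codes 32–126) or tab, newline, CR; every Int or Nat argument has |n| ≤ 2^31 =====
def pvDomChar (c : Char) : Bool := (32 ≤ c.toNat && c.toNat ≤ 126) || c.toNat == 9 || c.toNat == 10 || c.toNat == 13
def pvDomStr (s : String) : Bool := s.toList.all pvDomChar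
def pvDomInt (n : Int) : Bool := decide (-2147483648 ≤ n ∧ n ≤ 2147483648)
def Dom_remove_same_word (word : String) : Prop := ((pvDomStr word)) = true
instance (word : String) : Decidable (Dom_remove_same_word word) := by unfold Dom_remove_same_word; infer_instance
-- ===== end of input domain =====

-- B replaces A's one-pass stack simulation by fixpoint removal of the first adjacent
-- equal pair until none remains (objective: alternative algorithm, not faster).

-- ===== PORT A =====
-- loop body of A's for-loop: len(stack)==0 → append; stack[-1]==word[i] → pop; else append
def stepA (stack : List Char) (c : Char) : List Char :=
  if stack.length = 0 then stack ++ [c]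
  else
    let S := stack.getLast!      -- stack[-1] (stack nonempty in this branch)
    if S = c then stack.dropLast -- stack.pop()
    else stack ++ [c]

def remove_same_word (word : String) : Int :=
  ((word.toList.foldl stepA []).length : Int)

-- ===== PORT B =====
-- scan for the first adjacent equal pair; if found, return the list with both deleted
def firstPair : List Char → Option (List Char)
  | [] => none
  | [_] => none
  | a :: b :: t => if a = b then some t else (firstPair (b :: t)).map (a :: ·)

theorem firstPair_some_length : ∀ {l l' : List Char}, firstPair l = some l' → l'.length + 2 = l.length := by
  intro l
  induction l with
  | nil => intro l' h; simp [firstPair] at h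
  | cons a t ih =>
    intro l' h
    cases t with
    | nil => simp [firstPair] at h
    | cons b t' =>
      by_cases hab : a = b
      · simp [firstPair, hab] at h; subst h; simp
      · simp [firstPair, hab] at h
        obtain ⟨m, hm, hl'⟩ := h
        have := ih hm
        subst hl'; simp at this ⊢; omega

-- the while-loop of B: repeat first-pair deletion until no pair remains
def fixReduce (l : List Char) : List Char :=
  match h : firstPair l with
  | none => l
  | some l' => fixReduce l'
termination_by l.length
decreasing_by have := firstPair_some_length h; omega

def remove_same_word_alt (word : String) : Int :=
  ((fixReduce word.toList).length : Int)

-- ===== PRECONDITION & SPEC =====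
def Spec_remove_same_word (word : String) (out : Int) : Prop := out = remove_same_word_alt word
instance (word : String) (out : Int) : Decidable (Spec_remove_same_word word out) := by unfold Spec_remove_same_word; infer_instance

-- ===== CLAIM (what is proved, stated in full; the proofs are below) =====
def Claim_equal_remove_same_word : Prop := ∀ (word : String), Dom_remove_same_word word → Spec_remove_same_word word (remove_same_word word)

-- ===== LEMMAS AND PROOFS =====

-- head-at-front mirror of A's end-of-list stack step
def stepH (s : List Char) (c : Char) : List Char :=
  if s.head? = some c then s.tail else c :: s

theorem stepA_rev (s : List Char) (c : Char) : stepA s c = (stepH s.reverse c).reverse := by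
  cases s using List.reverseRecOn with
  | nil => simp [stepA, stepH]
  | append_singleton u a =>
    by_cases hac : a = c
    · subst hac
      simp [stepA, stepH, List.getLast!_eq_getLast?_getD]
    · simp [stepA, stepH, List.getLast!_eq_getLast?_getD, hac]

theorem foldA_rev (l : List Char) : ∀ s : List Char,
    List.foldl stepA s l = (List.foldl stepH s.reverse l).reverse := by
  induction l with
  | nil => intro s; simp
  | cons c l ih =>
    intro s
    simp only [List.foldl_cons]
    rw [stepA_rev, ih, List.reverse_reverse]

theorem stepH_chain {s : List Char} (hs : List.IsChain (· ≠ ·) s) (c : Char) :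
    List.IsChain (· ≠ ·) (stepH s c) := by
  unfold stepH
  split
  · exact hs.tail
  · rename_i h
    rw [List.isChain_cons]
    refine ⟨?_, hs⟩
    intro b hb hcb
    subst hcb
    exact h hb

theorem stepH_invol {s : List Char} (hs : List.IsChain (· ≠ ·) s) (c : Char) :
    stepH (stepH s c) c = s := by
  by_cases h : s.head? = some c
  · cases s with
    | nil => simp at h
    | cons a t =>
      simp at h; subst h
      simp only [stepH, List.head?_cons, List.tail_cons]
      cases t with
      | nil => simp
      | cons b t' =>
        have hab : a ≠ b := by
          have := (List.isChain_cons.mp hs).1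
          exact this b (by simp)
        simp
        intro hba
        exact absurd hba.symm hab
  · simp [stepH, h]

theorem foldH_chain (l : List Char) : ∀ {s : List Char}, List.IsChain (· ≠ ·) s →
    List.IsChain (· ≠ ·) (List.foldl stepH s l) := by
  induction l with
  | nil => intro s hs; exact hs
  | cons c l ih => intro s hs; exact ih (stepH_chain hs c)

theorem foldH_pair {s : List Char} (hs : List.IsChain (· ≠ ·) s) (u v : List Char) (c : Char) :
    List.foldl stepH s (u ++ c :: c :: v) = List.foldl stepH s (u ++ v) := by
  have hw : List.IsChain (· ≠ ·) (List.foldl stepH s u) := foldH_chain u hs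
  simp only [List.foldl_append, List.foldl_cons]
  rw [stepH_invol hw c]

theorem firstPair_split : ∀ {l l' : List Char}, firstPair l = some l' →
    ∃ u c v, l = u ++ c :: c :: v ∧ l' = u ++ v := by
  intro l
  induction l with
  | nil => intro l' h; simp [firstPair] at h
  | cons a t ih =>
    intro l' h
    cases t with
    | nil => simp [firstPair] at h
    | cons b t' =>
      by_cases hab : a = b
      · subst hab
        simp [firstPair] at h
        exact ⟨[], a, t', by simp, by simp [h]⟩
      · simp [firstPair, hab] at h
        obtain ⟨m, hm, hl'⟩ := h
        obtain ⟨u, c, v, hlu, hmv⟩ := ih hm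
        exact ⟨a :: u, c, v, by simp [hlu], by simp [← hl', hmv]⟩

theorem firstPair_none_chain : ∀ {l : List Char}, firstPair l = none →
    List.IsChain (· ≠ ·) l := by
  intro l
  induction l with
  | nil => intro _; exact List.IsChain.nil
  | cons a t ih =>
    intro h
    cases t with
    | nil => exact List.isChain_cons.mpr ⟨by simp, List.IsChain.nil⟩
    | cons b t' =>
      by_cases hab : a = b
      · simp [firstPair, hab] at h
      · simp [firstPair, hab] at h
        refine List.isChain_cons.mpr ⟨?_, ih h⟩
        intro y hy
        simp at hy
        subst hy
        exact hab

theorem foldH_chain_id : ∀ {r : List Char}, List.IsChain (· ≠ ·) r → ∀ s : List Char,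
    (∀ a b, s.head? = some a → r.head? = some b → a ≠ b) →
    List.foldl stepH s r = r.reverse ++ s := by
  intro r
  induction r with
  | nil => intro _ s _; simp
  | cons c r' ih =>
    intro hr s hhd
    have hstep : stepH s c = c :: s := by
      unfold stepH
      have : s.head? ≠ some c := by
        intro h
        exact hhd c c h rfl rfl
      simp [this]
    simp only [List.foldl_cons, hstep]
    rw [ih hr.tail (c :: s) ?_]
    · simp
    · intro a b ha hb
      simp at ha
      subst ha
      cases r' with
      | nil => simp at hb
      | cons d r'' =>
        simp at hb; subst hb
        exact (List.isChain_cons.mp hr).1 d (by simp)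

theorem fixReduce_fold (l : List Char) :
    List.foldl stepH [] (fixReduce l) = List.foldl stepH [] l := by
  fun_induction fixReduce l with
  | case1 l _ => rfl
  | case2 l l' h ih =>
    rw [ih]
    obtain ⟨u, c, v, hl, hl'⟩ := firstPair_split h
    rw [hl, hl']
    exact (foldH_pair (by simp) u v c).symm

theorem fixReduce_none (l : List Char) : firstPair (fixReduce l) = none := by
  fun_induction fixReduce l with
  | case1 l h => exact h
  | case2 l l' h ih => exact ih

theorem fold_eq_fixReduce (l : List Char) :
    List.foldl stepH [] l = (fixReduce l).reverse := by
  rw [← fixReduce_fold l]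
  rw [foldH_chain_id (firstPair_none_chain (fixReduce_none l)) [] (by intro a b h; simp at h)]
  simp

-- ===== VERDICT (by name: the statement is the Claim_ definition above) =====
theorem remove_same_word_spec : Claim_equal_remove_same_word := by
  intro word _
  unfold Spec_remove_same_word remove_same_word remove_same_word_alt
  rw [foldA_rev, List.reverse_nil, fold_eq_fixReduce]
  simp
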